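-- pv_equiv track=rewrite | github.com/marshallbrain/advent-of-code | 2019/scripts/day07/part1_main.py | append_zeros
-- ===== SOURCE A (Python) =====
-- def append_zeros(num_list, size):
--     new_list = []
--     num_list.reverse()
--     for i in range(0, size):
--         if i < len(num_list):
--             new_list.append(int(num_list[i]))
--         else:
--             new_list.append(0)
--     return new_list
-- ===== SOURCE B (Python) =====
-- def append_zeros(num_list, size):
--     # Pad-then-truncate: over-pad the (in-place reversed) list with size zeros,
--     # then one slice produces the answer; no per-index loop, no length arithmetic.
--     num_list.reverse()
--     n = max(size, 0)
--     return (num_list + [0] * n)[:n]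
-- ===== Notes on version B (the rewrite author's own statement) =====
-- stated objective: simpler
-- what changed: Replaces A's index-guarded accumulator loop (branching per index between element and 0) with a branch-free pad-then-truncate formulation: append size zeros to the reversed list once and take a single slice of length size; the in-place reverse of the argument is preserved.
import Mathlib
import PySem

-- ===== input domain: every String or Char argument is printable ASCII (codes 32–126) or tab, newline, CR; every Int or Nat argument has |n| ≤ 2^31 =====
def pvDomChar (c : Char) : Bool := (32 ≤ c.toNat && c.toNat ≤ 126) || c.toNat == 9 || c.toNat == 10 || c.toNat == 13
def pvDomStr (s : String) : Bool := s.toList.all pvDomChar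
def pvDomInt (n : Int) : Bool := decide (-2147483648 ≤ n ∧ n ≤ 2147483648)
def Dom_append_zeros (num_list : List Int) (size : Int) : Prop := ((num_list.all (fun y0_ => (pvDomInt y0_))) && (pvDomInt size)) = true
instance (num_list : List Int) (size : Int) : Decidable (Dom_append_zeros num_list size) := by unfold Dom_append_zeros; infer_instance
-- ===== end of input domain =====

-- B is branch-free pad-then-truncate instead of A's index-guarded loop; simpler, same cost.
-- Both programs reverse num_list in place; the equivalence proved here is about the RETURN value
-- (B performs the same mutation in Python).

-- ===== PORT A =====
-- for i in range(0, size): append int(num_list[i]) if i < len(num_list) else 0   (after num_list.reverse())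
def append_zeros (num_list : List Int) (size : Int) : List Int :=
  let rev := num_list.reverse
  (PySem.List.pyRange 0 size 1).foldl
    (fun acc i =>
      if i < (rev.length : Int) then acc ++ [PySem.List.pyGetD rev i 0]
      else acc ++ [0]) []

-- ===== PORT B =====
-- (num_list + [0] * n)[:n]   with n = max(size, 0), after num_list.reverse()
def append_zeros_alt (num_list : List Int) (size : Int) : List Int :=
  let rev := num_list.reverse
  let n := max size 0
  PySem.List.slice (rev ++ List.replicate n.toNat 0) none (some n)

-- ===== PRECONDITION & SPEC =====
def Spec_append_zeros (num_list : List Int) (size : Int) (out : List Int) : Prop := out = append_zeros_alt num_list size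
instance (num_list : List Int) (size : Int) (out : List Int) : Decidable (Spec_append_zeros num_list size out) := by unfold Spec_append_zeros; infer_instance

-- ===== CLAIM (what is proved, stated in full; the proofs are below) =====
def Claim_equal_append_zeros : Prop := ∀ (num_list : List Int) (size : Int), Dom_append_zeros num_list size → Spec_append_zeros num_list size (append_zeros num_list size)

-- ===== LEMMAS AND PROOFS =====

-- A's loop over range(0, n) produces: the first n elements of xs, padded with zeros to length n.
lemma loop_eq_take_pad (xs : List Int) (n : Nat) :
    (PySem.List.pyRange 0 (n : Int) 1).foldl
      (fun acc i =>
        if i < (xs.length : Int) then acc ++ [PySem.List.pyGetD xs i 0]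
        else acc ++ [0]) []
    = xs.take n ++ List.replicate (n - xs.length) 0 := by
  induction n with
  | zero => simp [PySem.List.pyRange_one_eq_nil]
  | succ m ih =>
    have hsplit : PySem.List.pyRange 0 ((m : Int) + 1) 1
        = PySem.List.pyRange 0 (m : Int) 1 ++ [(m : Int)] :=
      PySem.List.pyRange_one_succ_right (by exact_mod_cast Nat.zero_le m)
    push_cast
    rw [hsplit, List.foldl_append, ih]
    by_cases hm : m < xs.length
    · have hlt : (m : Int) < (xs.length : Int) := by exact_mod_cast hm
      have hget : PySem.List.pyGetD xs (m : Int) 0 = xs[m] := by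
        rw [PySem.List.pyGetD_natCast]
        simp [List.getD_eq_getElem?_getD, hm]
      simp only [List.foldl_cons, List.foldl_nil, if_pos hlt, hget]
      rw [List.take_add_one, List.getElem?_eq_getElem hm]
      have h1 : m + 1 - xs.length = 0 := by omega
      have h2 : m - xs.length = 0 := by omega
      simp [h1, h2]
    · have hge : ¬ ((m : Int) < (xs.length : Int)) := by exact_mod_cast hm
      simp only [List.foldl_cons, List.foldl_nil, if_neg hge]
      have h1 : xs.take (m + 1) = xs.take m := by
        rw [List.take_of_length_le (by omega), List.take_of_length_le (by omega)]
      have h2 : m + 1 - xs.length = (m - xs.length) + 1 := by omega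
      rw [h1, h2, List.replicate_succ']
      simp [List.append_assoc]

-- B's pad-then-truncate equals take-then-pad.
lemma take_append_replicate (xs : List Int) (n : Nat) :
    (xs ++ List.replicate n 0).take n = xs.take n ++ List.replicate (n - xs.length) 0 := by
  rw [List.take_append, List.take_replicate, Nat.min_eq_left (Nat.sub_le n xs.length)]

-- ===== VERDICT (by name: the statement is the Claim_ definition above) =====
theorem append_zeros_spec : Claim_equal_append_zeros := by
  intro num_list size _
  unfold Spec_append_zeros append_zeros append_zeros_alt
  set rev := num_list.reverse with hrev
  have hnn : 0 ≤ max size 0 := le_max_right _ _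
  rw [PySem.List.slice_to _ hnn]
  by_cases hs : size ≤ 0
  · have hmax : max size 0 = 0 := by omega
    simp [PySem.List.pyRange_one_eq_nil hs, hmax]
  · have hpos : 0 ≤ size := by omega
    have hmax : max size 0 = size := by omega
    have hcast : ((size.toNat : Int)) = size := Int.toNat_of_nonneg hpos
    have hloop := loop_eq_take_pad rev size.toNat
    rw [hcast] at hloop
    rw [hloop, hmax, take_append_replicate]
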